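-- pv_equiv track=rewrite | github.com/tabularasa31/ai-chatbot | backend/tenant_knowledge/extract_tenant_knowledge.py | _support_email_and_urls
-- ===== SOURCE A (Python) =====
-- def _support_email_and_urls(support_contacts: list[object]) -> tuple[str | None, list[str]]:
--     email: str | None = None
--     urls: list[str] = []
--     for raw in support_contacts:
--         if not isinstance(raw, str):
--             continue
--         value = raw.strip()
--         if not value:
--             continue
--         if "@" in value and not value.lower().startswith("http"):
--             if email is None:
--                 email = value
--             continue
--         if value.lower().startswith("http"):
--             urls.append(value)
--     # dedupe urls
--     seen: set[str] = set()
--     deduped: list[str] = []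
--     for u in urls:
--         key = u.casefold()
--         if key in seen:
--             continue
--         seen.add(key)
--         deduped.append(u)
--     return email, deduped
-- ===== SOURCE B (Python) =====
-- def _support_email_and_urls(support_contacts: list[object]) -> tuple[str | None, list[str]]:
--     # Right-to-left rebuild: walk the list backwards; the earliest email (seen last)
--     # simply overwrites, and each url is prepended after filtering later duplicates
--     # out of the partial result -- no seen-set, no intermediate urls list.
--     email: str | None = None
--     deduped: list[str] = []
--     for raw in reversed(support_contacts):
--         if not isinstance(raw, str):
--             continue
--         value = raw.strip()
--         if not value:
--             continue
--         if "@" in value and not value.lower().startswith("http"):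
--             email = value
--         elif value.lower().startswith("http"):
--             key = value.casefold()
--             deduped = [value] + [u for u in deduped if u.casefold() != key]
--     return email, deduped
-- ===== Notes on version B (the rewrite author's own statement) =====
-- stated objective: alternative
-- what changed: B traverses the list right-to-left and rebuilds the result by prepend-and-filter: the email is simply overwritten (so the earliest survives) and each url is prepended after filtering later casefold-duplicates out of the partial list, replacing A's forward classify pass plus seen-set dedupe pass; it trades the hash set for list filtering.
import Mathlib
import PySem

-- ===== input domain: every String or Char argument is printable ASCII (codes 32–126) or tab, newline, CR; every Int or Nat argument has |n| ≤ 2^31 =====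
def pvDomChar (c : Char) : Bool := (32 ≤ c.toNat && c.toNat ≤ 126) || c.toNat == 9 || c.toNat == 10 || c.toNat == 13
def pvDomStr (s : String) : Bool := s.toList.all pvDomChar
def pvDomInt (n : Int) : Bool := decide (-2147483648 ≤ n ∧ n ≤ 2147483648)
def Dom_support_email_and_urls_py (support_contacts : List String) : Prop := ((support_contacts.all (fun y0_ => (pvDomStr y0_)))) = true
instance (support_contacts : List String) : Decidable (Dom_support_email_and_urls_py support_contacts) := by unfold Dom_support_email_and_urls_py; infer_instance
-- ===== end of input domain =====

-- B rebuilds the answer right-to-left by overwrite (email) and prepend-plus-filter (urls), instead of A's forward classify pass followed by a seen-set dedupe pass; alternative algorithm, same return value.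

-- ===== PORT A =====
def aStep (st : Option String × List String) (raw : String) : Option String × List String :=
  -- 'isinstance(raw, str)' is always true here: the list holds strings by type.
  let value := PySem.Str.strip raw
  if value = "" then st
  else if PySem.Str.isIn "@" value && !(PySem.Str.startswith (PySem.Str.lower value) "http") then
    if st.1 = none then (some value, st.2) else st
  else if PySem.Str.startswith (PySem.Str.lower value) "http" then (st.1, st.2 ++ [value])
  else st

def dedupStep (st : PySem.Set String × List String) (u : String) : PySem.Set String × List String :=
  -- u.casefold() ported as lower: exact on the ASCII domain (casefold = lower there)
  let key := PySem.Str.lower u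
  if PySem.Set.contains st.1 key then st
  else (PySem.Set.add st.1 key, st.2 ++ [u])

def support_email_and_urls_py (support_contacts : List String) : Option String × List String :=
  let r := support_contacts.foldl aStep (none, [])
  (r.1, (r.2.foldl dedupStep (PySem.Set.empty, [])).2)

-- ===== PORT B =====
def bStep (st : Option String × List String) (raw : String) : Option String × List String :=
  let value := PySem.Str.strip raw
  if value = "" then st
  else if PySem.Str.isIn "@" value && !(PySem.Str.startswith (PySem.Str.lower value) "http") then
    (some value, st.2)           -- walking backward: just overwrite, earliest email wins
  else if PySem.Str.startswith (PySem.Str.lower value) "http" then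
    -- value.casefold() ported as lower: exact on the ASCII domain
    let key := PySem.Str.lower value
    (st.1, value :: st.2.filter (fun u => !(PySem.Str.lower u == key)))
  else st

def support_email_and_urls_py_alt (support_contacts : List String) : Option String × List String :=
  support_contacts.reverse.foldl bStep (none, [])

-- ===== PRECONDITION & SPEC =====
def Spec_support_email_and_urls_py (support_contacts : List String) (out : Option String × List String) : Prop := out = support_email_and_urls_py_alt support_contacts
instance (support_contacts : List String) (out : Option String × List String) : Decidable (Spec_support_email_and_urls_py support_contacts out) := by unfold Spec_support_email_and_urls_py; infer_instance

-- ===== CLAIM (what is proved, stated in full; the proofs are below) =====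
def Claim_equal_support_email_and_urls_py : Prop := ∀ (support_contacts : List String), Dom_support_email_and_urls_py support_contacts → Spec_support_email_and_urls_py support_contacts (support_email_and_urls_py support_contacts)

-- ===== LEMMAS AND PROOFS =====

-- first email of the list (common characterisation of both ports' email component)
def Espec : List String → Option String
  | [] => none
  | a :: l =>
    let v := PySem.Str.strip a
    if v = "" then Espec l
    else if PySem.Str.isIn "@" v && !(PySem.Str.startswith (PySem.Str.lower v) "http") then some v
    else Espec l

-- the stripped url items, in order, before dedup
def urlsSpec : List String → List String
  | [] => []
  | a :: l =>
    let v := PySem.Str.strip a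
    if v = "" then urlsSpec l
    else if PySem.Str.isIn "@" v && !(PySem.Str.startswith (PySem.Str.lower v) "http") then urlsSpec l
    else if PySem.Str.startswith (PySem.Str.lower v) "http" then v :: urlsSpec l
    else urlsSpec l

-- first-occurrence dedup by lowered key, parameterised by the "already seen" predicate
def Dd (p : String → Bool) : List String → List String
  | [] => []
  | u :: us =>
    if p (PySem.Str.lower u) then Dd p us
    else u :: Dd (fun x => p x || (x == PySem.Str.lower u)) us

theorem Dd_congr (us : List String) (p q : String → Bool) (h : ∀ x, p x = q x) :
    Dd p us = Dd q us := by
  induction us generalizing p q with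
  | nil => rfl
  | cons u us ih =>
    simp only [Dd, h]
    split
    · exact ih _ _ h
    · exact congrArg _ (ih _ _ (fun x => rfl))

theorem fst_some (l : List String) (x : String) (us : List String) :
    (l.foldl aStep (some x, us)).1 = some x := by
  induction l generalizing us with
  | nil => rfl
  | cons a l ih =>
    simp only [List.foldl_cons, aStep]
    split_ifs <;> first | exact ih _ | contradiction

theorem fst_none (l : List String) (us : List String) :
    (l.foldl aStep (none, us)).1 = Espec l := by
  induction l generalizing us with
  | nil => rfl
  | cons a l ih =>
    simp only [List.foldl_cons, aStep, Espec]
    split_ifs with h1 h2 h3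
    · exact ih us
    · exact fst_some l _ _
    · exact ih _
    · exact ih us

theorem snd_fold (l : List String) (e : Option String) (us : List String) :
    (l.foldl aStep (e, us)).2 = us ++ urlsSpec l := by
  induction l generalizing e us with
  | nil => simp [urlsSpec]
  | cons a l ih =>
    simp only [List.foldl_cons, aStep, urlsSpec]
    split_ifs <;> simp [ih]

theorem contains_add (s : PySem.Set String) (k x : String) :
    PySem.Set.contains (PySem.Set.add s k) x = (PySem.Set.contains s x || x == k) := by
  rw [Bool.eq_iff_iff]
  simp only [Bool.or_eq_true, PySem.Set.contains_iff, beq_iff_eq]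
  exact PySem.Set.mem_add s k x

theorem dedup_fold (us : List String) (s : PySem.Set String) (dd : List String) :
    (us.foldl dedupStep (s, dd)).2 = dd ++ Dd (fun x => PySem.Set.contains s x) us := by
  induction us generalizing s dd with
  | nil => simp [Dd]
  | cons u us ih =>
    simp only [List.foldl_cons, dedupStep, Dd]
    split_ifs with h
    · simp [ih]
    · simp only [ih, List.append_assoc, List.singleton_append]
      refine congrArg _ (congrArg _ (Dd_congr us _ _ (fun x => ?_)))
      exact contains_add s (PySem.Str.lower u) x

theorem filter_Dd (us : List String) (p : String → Bool) (k : String) :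
    (Dd p us).filter (fun u => !(PySem.Str.lower u == k)) = Dd (fun x => p x || (x == k)) us := by
  induction us generalizing p with
  | nil => rfl
  | cons u us ih =>
    simp only [Dd]
    rcases h : p (PySem.Str.lower u) with _ | _
    · simp only [Bool.false_eq_true, if_false]
      rcases hk : (PySem.Str.lower u == k) with _ | _
      · -- new key, different from k: keep u
        simp only [hk, Bool.false_eq_true, if_false, List.filter_cons, Bool.not_false, if_true]
        rw [ih]
        exact congrArg _ (Dd_congr us _ _ (fun x => by
          cases p x <;> cases (x == PySem.Str.lower u) <;> cases (x == k) <;> rfl))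
      · -- lower u = k: u is dropped by the filter, and by Dd (p ∨ ·==k) alike
        have hek : PySem.Str.lower u = k := eq_of_beq hk
        simp only [hk, if_true, List.filter_cons, Bool.not_true, Bool.false_eq_true, if_false]
        rw [ih]
        exact Dd_congr us _ _ (fun x => by
          rw [hek]; cases p x <;> cases (x == k) <;> rfl)
    · simp only [h, if_true, Bool.true_or]
      exact ih p

theorem B_char (l : List String) :
    support_email_and_urls_py_alt l = (Espec l, Dd (fun _ => false) (urlsSpec l)) := by
  unfold support_email_and_urls_py_alt
  rw [List.foldl_reverse]
  induction l with
  | nil => rfl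
  | cons a l ih =>
    rw [List.foldr_cons, ih]
    simp only [bStep, Espec, urlsSpec]
    split_ifs with h1 h2 h3
    · rfl
    · rfl
    · simp only [Prod.mk.injEq, true_and]
      rw [filter_Dd]
      simp [Dd]
    · rfl

theorem A_char (l : List String) :
    support_email_and_urls_py l = (Espec l, Dd (fun _ => false) (urlsSpec l)) := by
  unfold support_email_and_urls_py
  refine Prod.ext ?_ ?_
  · simpa using fst_none l []
  · simp only [snd_fold l none [], List.nil_append]
    rw [dedup_fold]
    simp only [List.nil_append]
    exact Dd_congr _ _ _ (fun x => by simp [PySem.Set.contains, PySem.Set.empty])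

-- ===== VERDICT (by name: the statement is the Claim_ definition above) =====
theorem support_email_and_urls_py_spec : Claim_equal_support_email_and_urls_py := by
  intro xs _
  unfold Spec_support_email_and_urls_py
  rw [A_char, B_char]
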